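-- pv_equiv track=rewrite | github.com/JianghanLi/LintCode | Contest 30 Quarter #1/1383. Subtree Count/alex.py | getSubtreeCount
-- ===== SOURCE A (Python) =====
-- def getSubtreeCount(start, end):
--     edges = zip(start, end)
--     from operator import mul
--     from collections import defaultdict as ddic, deque
--     graph = ddic(list)
--     rgraph = ddic(list)
--     degree = ddic(int)
--     for u, v in edges:
--         graph[u].append(v)
--         rgraph[v].append(u)
--         degree[u] += 1
--         degree[v]
--
--     dp = ddic(int)
--     MOD = 10000007
--     leaves = deque(k for k in degree if degree[k] == 0)
--     while leaves:
--         node = leaves.popleft()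
--         try:
--             bns = 1
--             for x in graph[node]:
--                 bns *= 1 + dp[x]
--                 bns %= MOD
--
--             dp[node] = bns
--         except:
--             dp[node] = 1
--         for par in rgraph[node]:
--             degree[par] -= 1
--             if degree[par] == 0:
--                 leaves.append(par)
--     return sum(dp.values()) % MOD
-- ===== SOURCE B (Python) =====
-- def getSubtreeCount(start, end):
--     MOD = 10000007
--     children = {}
--     for u, v in zip(start, end):
--         children.setdefault(u, []).append(v)
--         children.setdefault(v, [])
--     memo = {}
--     def count(n):
--         if n in memo:
--             return memo[n]
--         r = 1
--         for c in children[n]: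
--             r = r * (1 + count(c)) % MOD
--         memo[n] = r
--         return r
--     return sum(count(n) for n in children) % MOD
-- ===== Notes on version B (the rewrite author's own statement) =====
-- stated objective: simpler
-- what changed: Replaces the iterative Kahn leaf-peeling (three defaultdicts, out-degree counting, reverse graph, deque) by a memoized recursive postorder evaluation of count(n) = prod(1+count(c)) mod 10000007 over a single adjacency dict.
-- outside the precondition, e.g. on getSubtreeCount([1], [1]): A returns 0, B raises RecursionError
import Mathlib
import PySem

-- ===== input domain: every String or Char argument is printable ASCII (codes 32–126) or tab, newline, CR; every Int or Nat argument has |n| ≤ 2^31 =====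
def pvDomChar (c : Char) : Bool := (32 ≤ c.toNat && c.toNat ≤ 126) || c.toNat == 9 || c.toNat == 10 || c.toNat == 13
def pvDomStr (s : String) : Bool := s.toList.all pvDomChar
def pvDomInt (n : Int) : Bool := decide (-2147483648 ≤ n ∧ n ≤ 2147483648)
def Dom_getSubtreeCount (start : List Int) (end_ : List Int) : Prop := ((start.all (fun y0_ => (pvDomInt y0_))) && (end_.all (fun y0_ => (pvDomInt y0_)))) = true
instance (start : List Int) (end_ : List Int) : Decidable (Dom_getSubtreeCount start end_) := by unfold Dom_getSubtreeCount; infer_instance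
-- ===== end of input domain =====

-- B replaces A's iterative Kahn leaf-peeling (graph/rgraph/degree dicts + deque) by a memoized
-- recursive postorder evaluation of the same product recurrence (objective: simpler).

-- ===== PORT A =====
-- the while-loop of A, with a fuel guard for totality (each node is enqueued at most once,
-- so fuel = number of distinct nodes is always enough); A's try/except is ported as the try
-- body alone: every dict A touches is a defaultdict, so the except branch is unreachable.
def pvKahnLoop (g rg : PySem.Dict Int (List Int)) :
    Nat → PySem.Dict Int Int → List Int → PySem.Dict Int Int → PySem.Dict Int Int
  | 0, _, _, dp => dp
  | _ + 1, _, [], dp => dp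
  | fuel + 1, deg, node :: rest, dp =>
    let bns := (g.getD node []).foldl
      (fun b x => PySem.Int.mod (b * (1 + dp.getD x 0)) 10000007) 1
    let dp' := dp.insert node bns
    let s := (rg.getD node []).foldl
      (fun (s : PySem.Dict Int Int × List Int) par =>
        let d := s.1.getD par 0 - 1
        (s.1.insert par d, if d = 0 then s.2 ++ [par] else s.2)) (deg, rest)
    pvKahnLoop g rg fuel s.1 s.2 dp'

def getSubtreeCount (start : List Int) (end_ : List Int) : Int :=
  let edges := start.zip end_
  let st := edges.foldl
    (fun (s : PySem.Dict Int (List Int) × PySem.Dict Int (List Int) × PySem.Dict Int Int) e =>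
      (s.1.modify e.1 [] (· ++ [e.2]),          -- graph[u].append(v)
       s.2.1.modify e.2 [] (· ++ [e.1]),        -- rgraph[v].append(u)
       (s.2.2.modify e.1 0 (· + 1)).setdefault e.2 0))  -- degree[u] += 1; degree[v]
    (PySem.Dict.empty, PySem.Dict.empty, PySem.Dict.empty)
  let degree := st.2.2
  let leaves := degree.keys.filter (fun k => degree.getD k 0 == 0)
  let dp := pvKahnLoop st.1 st.2.1 degree.keys.length degree leaves PySem.Dict.empty
  PySem.Int.mod (dp.values.foldl (· + ·) 0) 10000007

-- ===== PORT B =====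
-- memoized recursion, with a fuel guard for totality (recursion depth on an acyclic graph is
-- at most the number of distinct nodes, so fuel = that number + 1 is always enough on Pre_)
def pvCountB (childD : PySem.Dict Int (List Int)) :
    Nat → PySem.Dict Int Int → Int → Int × PySem.Dict Int Int
  | 0, memo, _ => (0, memo)
  | fuel + 1, memo, n =>
    match memo.get? n with
    | some r => (r, memo)
    | none =>
      let s := (childD.getD n []).foldl
        (fun (s : Int × PySem.Dict Int Int) c =>
          let rc := pvCountB childD fuel s.2 c
          (PySem.Int.mod (s.1 * (1 + rc.1)) 10000007, rc.2)) (1, memo)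
      (s.1, s.2.insert n s.1)

def getSubtreeCount_alt (start : List Int) (end_ : List Int) : Int :=
  let childD := (start.zip end_).foldl
    (fun (d : PySem.Dict Int (List Int)) e =>
      (d.insert e.1 (d.getD e.1 [] ++ [e.2])).setdefault e.2 [])
    PySem.Dict.empty
  let s := childD.keys.foldl
    (fun (s : Int × PySem.Dict Int Int) n =>
      let r := pvCountB childD (childD.keys.length + 1) s.2 n
      (s.1 + r.1, r.2)) (0, PySem.Dict.empty)
  PySem.Int.mod s.1 10000007

-- ===== PRECONDITION & SPEC =====
-- the out-neighbour lists of the directed graph of zip(start, end), and its node set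
def pvChildren (edges : List (Int × Int)) (n : Int) : List Int :=
  (edges.filter (fun p => p.1 == n)).map (·.2)
def pvStep (edges : List (Int × Int)) (s : List Int) : List Int :=
  PySem.Set.ofList (s.flatMap (pvChildren edges))
def pvNodes (start end_ : List Int) : List Int :=
  PySem.Set.ofList ((start.zip end_).flatMap (fun e => [e.1, e.2]))

-- Pre_ excludes inputs whose directed graph zip(start, end) has a cycle (stated as: some node has a
-- directed walk of length |nodes|): there A returns a partial sum silently omitting the cyclic nodes,
-- while B's recursion does not terminate (RecursionError).
def Pre_getSubtreeCount (start : List Int) (end_ : List Int) : Prop :=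
  ∀ n ∈ pvNodes start end_,
    (pvStep (start.zip end_))^[(pvNodes start end_).length] [n] = []
instance (start : List Int) (end_ : List Int) : Decidable (Pre_getSubtreeCount start end_) := by
  unfold Pre_getSubtreeCount; infer_instance

def pvWitness_getSubtreeCount : List Int × List Int := ([1, 1, 2], [2, 3, 3])

def Spec_getSubtreeCount (start : List Int) (end_ : List Int) (out : Int) : Prop := out = getSubtreeCount_alt start end_
instance (start : List Int) (end_ : List Int) (out : Int) : Decidable (Spec_getSubtreeCount start end_ out) := by unfold Spec_getSubtreeCount; infer_instance

-- ===== CLAIM (what is proved, stated in full; the proofs are below) =====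
def Claim_equal_getSubtreeCount : Prop := ∀ (start : List Int) (end_ : List Int), Dom_getSubtreeCount start end_ → Pre_getSubtreeCount start end_ → Spec_getSubtreeCount start end_ (getSubtreeCount start end_)

-- ===== LEMMAS AND PROOFS =====

-- ===== proof-layer helper definitions =====
def pvParents (edges : List (Int × Int)) (n : Int) : List Int :=
  (edges.filter (fun p => p.2 == n)).map (·.1)
def pvNodesE (edges : List (Int × Int)) : List Int :=
  PySem.Set.ofList (edges.flatMap (fun e => [e.1, e.2]))
-- the shared fuel-indexed specification value: pvF edges fuel n is the product over the
-- children c of n of (1 + pvF (fuel-1) c), reduced mod 10000007 at each step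
def pvF (edges : List (Int × Int)) : Nat → Int → Int
  | 0, _ => 0
  | fuel + 1, n =>
    (pvChildren edges n).foldl (fun a c => PySem.Int.mod (a * (1 + pvF edges fuel c)) 10000007) 1


theorem mem_pvStep {edges : List (Int × Int)} {s : List Int} {x : Int} :
    x ∈ pvStep edges s ↔ ∃ y ∈ s, x ∈ pvChildren edges y := by
  simp [pvStep, PySem.Set.mem_ofList, List.mem_flatMap]

theorem pvIter_subset {edges : List (Int × Int)} (k : Nat) :
    ∀ {s t : List Int}, (∀ x ∈ s, x ∈ t) →
      ∀ x ∈ (pvStep edges)^[k] s, x ∈ (pvStep edges)^[k] t := by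
  induction k with
  | zero => intro s t h; simpa using h
  | succ k ih =>
    intro s t h
    rw [Function.iterate_succ_apply, Function.iterate_succ_apply]
    apply ih
    intro x hx
    rw [mem_pvStep] at hx ⊢
    obtain ⟨y, hy, hxy⟩ := hx
    exact ⟨y, h y hy, hxy⟩

theorem pvIter_child_empty {edges : List (Int × Int)} {n c : Int} {k : Nat}
    (hc : c ∈ pvChildren edges n) (h : (pvStep edges)^[k + 1] [n] = []) :
    (pvStep edges)^[k] [c] = [] := by
  rw [Function.iterate_succ_apply] at h
  have hsub : ∀ x ∈ ([c] : List Int), x ∈ pvStep edges [n] := by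
    intro x hx
    simp at hx; subst hx
    rw [mem_pvStep]; exact ⟨n, by simp, hc⟩
  have := pvIter_subset (edges := edges) k hsub
  rw [h] at this
  rw [List.eq_nil_iff_forall_not_mem]
  intro x hx
  exact absurd (this x hx) (by simp)

theorem pvF_stable (edges : List (Int × Int)) :
    ∀ (k : Nat) (n : Int) (f1 f2 : Nat), (pvStep edges)^[k] [n] = [] →
      k ≤ f1 → k ≤ f2 → pvF edges f1 n = pvF edges f2 n := by
  intro k
  induction k with
  | zero => intro n f1 f2 h _ _; simp at h
  | succ k ih =>
    intro n f1 f2 h h1 h2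
    obtain ⟨a, rfl⟩ : ∃ a, f1 = a + 1 := ⟨f1 - 1, by omega⟩
    obtain ⟨b, rfl⟩ : ∃ b, f2 = b + 1 := ⟨f2 - 1, by omega⟩
    show pvF edges (a+1) n = pvF edges (b+1) n
    simp only [pvF]
    apply PySem.List.foldl_congr_mem
    intro acc c hc
    rw [ih c a b (pvIter_child_empty hc h) (by omega) (by omega)]

-- every copy of a passes P: splitting the filtered length at a
theorem filter_length_split (l : List Int) (P : Int → Bool) (a : Int) (ha : P a = true) :
    (l.filter P).length = (l.filter (fun c => P c && !(c == a))).length + l.count a := by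
  induction l with
  | nil => simp
  | cons x t ih =>
    by_cases hx : x = a
    · subst hx
      simp [List.filter_cons, ha, List.count_cons, ih]
      omega
    · simp only [List.filter_cons, List.count_cons, if_neg hx]
      by_cases hP : P x = true
      · simp [hP, hx, ih]; omega
      · simp only [hP, Bool.false_and]
        simp at hP
        simp [hP, ih, hx]

theorem filter_nil_of_length_eq_count (l : List Int) (P : Int → Bool) (a : Int) (ha : P a = true)
    (h : (l.filter P).length = l.count a) :
    ∀ c ∈ l, P c = true → c = a := by
  have := filter_length_split l P a ha
  rw [h] at this
  have h0 : (l.filter (fun c => P c && !(c == a))).length = 0 := by omega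
  rw [List.length_eq_zero_iff] at h0
  intro c hc hPc
  by_contra hne
  have : c ∈ l.filter (fun c => P c && !(c == a)) := by
    rw [List.mem_filter]
    exact ⟨hc, by simp [hPc, hne]⟩
  rw [h0] at this; simp at this

-- keys of a fold whose every step adds e.1 then e.2 to the key set
theorem keys_fold_generic {ν : Type} (f : PySem.Dict Int ν → Int × Int → PySem.Dict Int ν)
    (hf : ∀ d e, (f d e).keys = PySem.Set.add (PySem.Set.add d.keys e.1) e.2) :
    ∀ (l : List (Int × Int)) (d : PySem.Dict Int ν),
      (l.foldl f d).keys = PySem.Set.update d.keys (l.flatMap fun e => [e.1, e.2]) := by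
  intro l
  induction l with
  | nil => intro d; simp [PySem.Set.update_nil]
  | cons e t ih =>
    intro d
    rw [List.foldl_cons, ih, List.flatMap_cons]
    show _ = PySem.Set.update d.keys ([e.1, e.2] ++ t.flatMap fun e => [e.1, e.2])
    rw [PySem.Set.update_append, PySem.Set.update_cons, PySem.Set.update_cons,
      PySem.Set.update_nil, hf]

theorem getD_setdefault_same {ν : Type} (d : PySem.Dict Int ν) (k x : Int) (v : ν) :
    (d.setdefault k v).getD x v = d.getD x v := by
  by_cases hx : x = k
  · subst hx; exact PySem.Dict.getD_setdefault_self d x v v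
  · rw [PySem.Dict.getD_eq_get?_getD, PySem.Dict.get?_setdefault_of_ne d v hx,
      ← PySem.Dict.getD_eq_get?_getD]

-- A's degree dict after the build loop
theorem getD_deg_fold (n : Int) :
    ∀ (l : List (Int × Int)) (d : PySem.Dict Int Int),
      (l.foldl (fun d (e : Int × Int) => (d.modify e.1 0 (· + 1)).setdefault e.2 0) d).getD n 0 =
        d.getD n 0 + ((l.filter (fun p => p.1 == n)).length : Int) := by
  intro l
  induction l with
  | nil => intro d; simp
  | cons e t ih =>
    intro d
    rw [List.foldl_cons, ih, getD_setdefault_same, PySem.Dict.getD_modify]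
    by_cases hn : n = e.1
    · subst hn; simp [List.filter_cons]; omega
    · have : ¬ (e.1 == n) = true := by simp; exact fun h => hn h.symm
      simp [List.filter_cons, this, hn]

-- B's children dict after the build loop
theorem getD_childD_fold (n : Int) :
    ∀ (l : List (Int × Int)) (d : PySem.Dict Int (List Int)),
      (l.foldl (fun d (e : Int × Int) =>
          (d.insert e.1 (d.getD e.1 [] ++ [e.2])).setdefault e.2 []) d).getD n [] =
        d.getD n [] ++ (l.filter (fun p => p.1 == n)).map (·.2) := by
  intro l
  induction l with
  | nil => intro d; simp
  | cons e t ih =>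
    intro d
    rw [List.foldl_cons, ih, getD_setdefault_same, PySem.Dict.getD_insert]
    by_cases hn : n = e.1
    · subst hn; simp [List.filter_cons]
    · have : ¬ (e.1 == n) = true := by simp; exact fun h => hn h.symm
      simp [List.filter_cons, this, hn]

-- A's rgraph getD: reduce to the modify-append library lemma through Prod.swap
theorem getD_rgraph_fold (n : Int) (l : List (Int × Int)) :
    (l.foldl (fun (d : PySem.Dict Int (List Int)) (e : Int × Int) =>
        d.modify e.2 [] (· ++ [e.1])) PySem.Dict.empty).getD n [] = pvParents l n := by
  have hmap : (l.map Prod.swap).foldl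
      (fun (d : PySem.Dict Int (List Int)) (p : Int × Int) => d.modify p.1 [] (· ++ [p.2]))
      PySem.Dict.empty =
      l.foldl (fun (d : PySem.Dict Int (List Int)) (e : Int × Int) =>
        d.modify e.2 [] (· ++ [e.1])) PySem.Dict.empty := by
    rw [List.foldl_map]; rfl
  rw [← hmap, PySem.Dict.getD_foldl_modify_append]
  have hfm : (l.map Prod.swap).filter (fun p => p.1 == n) =
      (l.filter (fun p => p.2 == n)).map Prod.swap := by
    rw [List.filter_map]; rfl
  rw [hfm, List.map_map, pvParents]
  simp

theorem keys_setdefault_add {ν : Type} (d : PySem.Dict Int ν) (k : Int) (v : ν) :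
    (d.setdefault k v).keys = PySem.Set.add d.keys k := by
  rw [PySem.Dict.keys_setdefault, PySem.Set.add_eq_ite]
  by_cases hc : d.contains k = true
  · rw [if_pos hc, if_pos ((PySem.Dict.contains_iff_mem_keys d k).mp hc)]
  · rw [if_neg hc, if_neg (fun hm => hc ((PySem.Dict.contains_iff_mem_keys d k).mpr hm))]

theorem keys_insert_add {ν : Type} (d : PySem.Dict Int ν) (k : Int) (v : ν) :
    (d.insert k v).keys = PySem.Set.add d.keys k := by
  rw [PySem.Set.add_eq_ite]
  by_cases hc : d.contains k = true
  · rw [PySem.Dict.keys_insert_of_contains d v hc,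
      if_pos ((PySem.Dict.contains_iff_mem_keys d k).mp hc)]
  · rw [PySem.Dict.keys_insert_of_not_contains d v (by simpa using hc),
      if_neg (fun hm => hc ((PySem.Dict.contains_iff_mem_keys d k).mpr hm))]

theorem keys_step_A (d : PySem.Dict Int Int) (e : Int × Int) :
    ((d.modify e.1 0 (· + 1)).setdefault e.2 0).keys =
      PySem.Set.add (PySem.Set.add d.keys e.1) e.2 := by
  rw [keys_setdefault_add, PySem.Dict.keys_modify, keys_insert_add]

theorem keys_step_B (d : PySem.Dict Int (List Int)) (e : Int × Int) :
    ((d.insert e.1 (d.getD e.1 [] ++ [e.2])).setdefault e.2 []).keys =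
      PySem.Set.add (PySem.Set.add d.keys e.1) e.2 := by
  rw [keys_setdefault_add, keys_insert_add]

-- the inner decrement loop of A: degree values drop by the multiplicity, the queue gains
-- exactly the parents whose degree hits zero, each once
theorem declLoop :
    ∀ (l : List Int) (deg : PySem.Dict Int Int) (q : List Int),
      (∀ p : Int, (l.count p : Int) ≤ deg.getD p 0) →
      (∀ p : Int,
          (l.foldl (fun (s : PySem.Dict Int Int × List Int) par =>
            (s.1.insert par (s.1.getD par 0 - 1),
             if s.1.getD par 0 - 1 = 0 then s.2 ++ [par] else s.2)) (deg, q)).1.getD p 0 =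
          deg.getD p 0 - l.count p) ∧
      (∃ ext : List Int,
        (l.foldl (fun (s : PySem.Dict Int Int × List Int) par =>
            (s.1.insert par (s.1.getD par 0 - 1),
             if s.1.getD par 0 - 1 = 0 then s.2 ++ [par] else s.2)) (deg, q)).2 = q ++ ext ∧
        ext.Nodup ∧
        (∀ p : Int, p ∈ ext ↔ p ∈ l ∧ deg.getD p 0 = (l.count p : Int))) := by
  intro l
  induction l with
  | nil =>
    intro deg q _
    refine ⟨by simp, ⟨[], by simp, by simp, by simp⟩⟩
  | cons a t ih =>
    intro deg q hcnt
    set deg1 := deg.insert a (deg.getD a 0 - 1) with hdeg1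
    have hd1 : ∀ p : Int, deg1.getD p 0 = if p = a then deg.getD a 0 - 1 else deg.getD p 0 := by
      intro p; rw [hdeg1, PySem.Dict.getD_insert]
    have hcnt' : ∀ p : Int, (t.count p : Int) ≤ deg1.getD p 0 := by
      intro p
      rw [hd1]
      by_cases hp : p = a
      · subst hp
        have := hcnt p
        rw [List.count_cons_self] at this
        simp only [if_pos rfl]
        push_cast at this ⊢
        omega
      · rw [if_neg hp]
        have := hcnt p
        rw [List.count_cons_of_ne (fun h => hp h.symm)] at this
        exact this
    set q1 := if deg.getD a 0 - 1 = 0 then q ++ [a] else q with hq1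
    obtain ⟨H1, ext', hq', hnd', hmem'⟩ := ih deg1 q1 hcnt'
    rw [List.foldl_cons]
    constructor
    · intro p
      show (_ : Int) = _
      rw [H1, hd1]
      by_cases hp : p = a
      · subst hp; rw [if_pos rfl, List.count_cons_self]; push_cast; ring
      · rw [if_neg hp, List.count_cons_of_ne (fun h => hp h.symm)]
    · by_cases hz : deg.getD a 0 - 1 = 0
      · -- a is appended now; it cannot appear in t or in ext'
        have hca : (t.count a : Int) = 0 := by
          have h1 := hcnt a
          rw [List.count_cons_self] at h1
          have h2 := hcnt' a
          rw [hd1, if_pos rfl, hz] at h2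
          push_cast at h2 ⊢
          omega
        have hta : a ∉ t := by
          intro hm
          have := List.count_pos_iff.mpr hm
          omega
        refine ⟨a :: ext', ?_, ?_, ?_⟩
        · have : q1 = q ++ [a] := by rw [hq1, if_pos hz]
          rw [hq', this, List.append_assoc]; rfl
        · refine List.nodup_cons.mpr ⟨?_, hnd'⟩
          intro hm
          exact hta ((hmem' a).mp hm).1
        · intro p
          by_cases hp : p = a
          · subst hp
            simp only [List.mem_cons, true_or, true_iff]
            refine ⟨by simp, ?_⟩
            rw [List.count_cons_self]
            push_cast
            omega
          · constructor
            · intro hm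
              rcases List.mem_cons.mp hm with h | h
              · exact absurd h hp
              · have := (hmem' p).mp h
                rw [hd1, if_neg hp] at this
                rw [List.count_cons_of_ne (fun h => hp h.symm)]
                exact ⟨List.mem_cons_of_mem _ this.1, this.2⟩
            · intro ⟨hm, hc⟩
              rcases List.mem_cons.mp hm with h | h
              · exact absurd h hp
              · refine List.mem_cons_of_mem _ ((hmem' p).mpr ?_)
                rw [hd1, if_neg hp]
                rw [List.count_cons_of_ne (fun h => hp h.symm)] at hc
                exact ⟨h, hc⟩
      · -- a not appended now
        have hqq : q1 = q := by rw [hq1, if_neg hz]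
        refine ⟨ext', by rw [hq', hqq], hnd', ?_⟩
        intro p
        by_cases hp : p = a
        · subst hp
          rw [hmem' p, hd1, if_pos rfl]
          constructor
          · intro ⟨hm, hc⟩
            refine ⟨List.mem_cons_of_mem _ hm, ?_⟩
            rw [List.count_cons_self]
            push_cast
            omega
          · intro ⟨hm, hc⟩
            rcases List.mem_cons.mp hm with _ | hm'
            · -- p = a is the head; need p ∈ t: from deg a = count and hz
              rw [List.count_cons_self] at hc
              by_cases hmt : p ∈ t
              · refine ⟨hmt, ?_⟩; push_cast at hc ⊢; omega
              · exfalso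
                have : t.count p = 0 := List.count_eq_zero.mpr hmt
                rw [this] at hc
                push_cast at hc
                omega
            · rw [List.count_cons_self] at hc
              refine ⟨hm', ?_⟩
              push_cast at hc ⊢
              omega
        · rw [hmem' p, hd1, if_neg hp, List.count_cons_of_ne (fun h => hp h.symm)]
          constructor
          · intro ⟨hm, hc⟩; exact ⟨List.mem_cons_of_mem _ hm, hc⟩
          · intro ⟨hm, hc⟩
            rcases List.mem_cons.mp hm with h | h
            · exact absurd h hp
            · exact ⟨h, hc⟩

theorem mem_nodesE_of_child {edges : List (Int × Int)} {c n : Int}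
    (hc : c ∈ pvChildren edges n) : c ∈ pvNodesE edges := by
  simp only [pvChildren, List.mem_map, List.mem_filter] at hc
  obtain ⟨p, ⟨hp, _⟩, rfl⟩ := hc
  simp only [pvNodesE, PySem.Set.mem_ofList, List.mem_flatMap]
  exact ⟨p, hp, by simp⟩

theorem mem_nodesE_of_parent {edges : List (Int × Int)} {p n : Int}
    (hp : p ∈ pvParents edges n) : p ∈ pvNodesE edges := by
  simp only [pvParents, List.mem_map, List.mem_filter] at hp
  obtain ⟨e, ⟨he, _⟩, rfl⟩ := hp
  simp only [pvNodesE, PySem.Set.mem_ofList, List.mem_flatMap]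
  exact ⟨e, he, by simp⟩

theorem count_parents (edges : List (Int × Int)) (p n : Int) :
    (pvParents edges n).count p = (pvChildren edges p).count n := by
  induction edges with
  | nil => simp [pvParents, pvChildren]
  | cons e t ih =>
    simp only [pvParents, pvChildren, List.filter_cons] at *
    by_cases h1 : e.1 = p <;> by_cases h2 : e.2 = n <;>
      simp [h1, h2, List.count_cons, ih]


def PreE (edges : List (Int × Int)) : Prop :=
  ∀ n ∈ pvNodesE edges, (pvStep edges)^[(pvNodesE edges).length] [n] = []

structure KInv (edges : List (Int × Int)) (deg : PySem.Dict Int Int) (q : List Int)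
    (dp : PySem.Dict Int Int) : Prop where
  dpNodup : dp.keys.Nodup
  qNodup : q.Nodup
  disj : ∀ x ∈ dp.keys, x ∉ q
  dpSub : ∀ x ∈ dp.keys, x ∈ pvNodesE edges
  qSub : ∀ x ∈ q, x ∈ pvNodesE edges
  dpVal : ∀ x ∈ dp.keys, dp.getD x 0 = pvF edges ((pvNodesE edges).length + 1) x
  dpClosed : ∀ x ∈ dp.keys, ∀ c ∈ pvChildren edges x, c ∈ dp.keys
  qReady : ∀ x ∈ q, ∀ c ∈ pvChildren edges x, c ∈ dp.keys
  degVal : ∀ x : Int, deg.getD x 0 =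
    (((pvChildren edges x).filter (fun c => !(decide (c ∈ dp.keys)))).length : Int)
  qIff : ∀ x ∈ pvNodesE edges, x ∉ dp.keys → (x ∈ q ↔ deg.getD x 0 = 0)

theorem kahn_correct (edges : List (Int × Int)) (hPre : PreE edges)
    (g rg : PySem.Dict Int (List Int))
    (hg : ∀ n, g.getD n [] = pvChildren edges n)
    (hrg : ∀ n, rg.getD n [] = pvParents edges n) :
    ∀ (fuel : Nat) (deg : PySem.Dict Int Int) (q : List Int) (dp : PySem.Dict Int Int),
      KInv edges deg q dp → (pvNodesE edges).length ≤ fuel + dp.keys.length →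
      (pvKahnLoop g rg fuel deg q dp).keys.Nodup ∧
      (∀ x, x ∈ (pvKahnLoop g rg fuel deg q dp).keys ↔ x ∈ pvNodesE edges) ∧
      (∀ x ∈ (pvKahnLoop g rg fuel deg q dp).keys,
        (pvKahnLoop g rg fuel deg q dp).getD x 0 = pvF edges ((pvNodesE edges).length + 1) x) := by
  intro fuel
  induction fuel with
  | zero =>
    intro deg q dp inv hlen
    have hperm : dp.keys.Perm (pvNodesE edges) :=
      (inv.dpNodup.subperm (fun x hx => inv.dpSub x hx)).perm_of_length_le (by simpa using hlen)
    exact ⟨inv.dpNodup, fun x => hperm.mem_iff, inv.dpVal⟩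
  | succ fuel ih =>
    intro deg q dp inv hlen
    cases q with
    | nil =>
      -- queue empty: every node is already processed (else follow unprocessed children; acyclicity bounds the descent)
      have hcomplete : ∀ (k : Nat) (x : Int), (pvStep edges)^[k] [x] = [] →
          x ∈ pvNodesE edges → x ∈ dp.keys := by
        intro k
        induction k with
        | zero => intro x h; simp at h
        | succ k ihk =>
          intro x h hx
          by_contra hnot
          have hne : ¬ deg.getD x 0 = 0 := fun h0 =>
            (by simpa using (inv.qIff x hx hnot).mpr h0 : False)
          rw [inv.degVal x] at hne
          have : ((pvChildren edges x).filter (fun c => !(decide (c ∈ dp.keys)))) ≠ [] := by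
            intro hnil; rw [hnil] at hne; simp at hne
          obtain ⟨c, hcmem⟩ := List.exists_mem_of_ne_nil _ this
          have hcf := List.mem_filter.mp hcmem
          have hcchild : c ∈ pvChildren edges x := hcf.1
          have hcnot : c ∉ dp.keys := by simpa using hcf.2
          exact hcnot (ihk c (pvIter_child_empty hcchild h) (mem_nodesE_of_child hcchild))
      have hall : ∀ x ∈ pvNodesE edges, x ∈ dp.keys := fun x hx =>
        hcomplete _ x (hPre x hx) hx
      have hres : pvKahnLoop g rg (fuel + 1) deg [] dp = dp := rfl
      rw [hres]
      exact ⟨inv.dpNodup, fun x => ⟨fun hx => inv.dpSub x hx, fun hx => hall x hx⟩, inv.dpVal⟩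
    | cons node rest =>
      have hnodeq : node ∈ (node :: rest : List Int) := by simp
      have hnodeN : node ∈ pvNodesE edges := inv.qSub node hnodeq
      have hnodedp : node ∉ dp.keys := fun h => inv.disj node h hnodeq
      -- the computed product is the spec value
      have hbns : (g.getD node []).foldl
          (fun b x => PySem.Int.mod (b * (1 + dp.getD x 0)) 10000007) 1 =
          pvF edges ((pvNodesE edges).length + 1) node := by
        rw [hg]
        have hunf : pvF edges ((pvNodesE edges).length + 1) node =
            (pvChildren edges node).foldl
              (fun a c => PySem.Int.mod (a * (1 + pvF edges (pvNodesE edges).length c)) 10000007) 1 := rfl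
        rw [hunf]
        apply PySem.List.foldl_congr_mem
        intro acc c hc
        have hcdp : c ∈ dp.keys := inv.qReady node hnodeq c hc
        rw [inv.dpVal c hcdp,
          pvF_stable edges (pvNodesE edges).length c ((pvNodesE edges).length + 1)
            (pvNodesE edges).length (hPre c (mem_nodesE_of_child hc)) (by omega) (by omega)]
      -- the decrement loop
      have hcnt : ∀ p : Int, ((rg.getD node []).count p : Int) ≤ deg.getD p 0 := by
        intro p
        rw [hrg, inv.degVal p, count_parents]
        have hP : (fun c => !(decide (c ∈ dp.keys))) node = true := by simpa using hnodedp
        have := filter_length_split (pvChildren edges p) (fun c => !(decide (c ∈ dp.keys))) node hP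
        omega
      obtain ⟨hdeg', ext, hq', hextnd, hextmem⟩ := declLoop (rg.getD node []) deg rest hcnt
      -- facts about ext
      have hextdeg : ∀ p ∈ ext, deg.getD p 0 = ((rg.getD node []).count p : Int) ∧ p ∈ rg.getD node [] :=
        fun p hp => ⟨((hextmem p).mp hp).2, ((hextmem p).mp hp).1⟩
      have hextpos : ∀ p ∈ ext, deg.getD p 0 ≠ 0 := by
        intro p hp h0
        obtain ⟨hcnt0, hmem⟩ := hextdeg p hp
        have : (rg.getD node []).count p ≠ 0 := by
          rw [Ne, List.count_eq_zero]; exact fun h => h hmem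
        omega
      have hdpdeg : ∀ x ∈ dp.keys, deg.getD x 0 = 0 := by
        intro x hx
        rw [inv.degVal x]
        have : (pvChildren edges x).filter (fun c => !(decide (c ∈ dp.keys))) = [] := by
          rw [List.filter_eq_nil_iff]
          intro c hc
          simpa using inv.dpClosed x hx c hc
        rw [this]; rfl
      have hextdp : ∀ p ∈ ext, p ∉ dp.keys := fun p hp hmem =>
        hextpos p hp (hdpdeg p hmem)
      have hextnode : node ∉ ext := by
        intro hp
        have h0 : deg.getD node 0 = 0 := (inv.qIff node hnodeN hnodedp).mp hnodeq
        exact hextpos node hp h0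
      have hrestq : ∀ x ∈ rest, x ∈ (node :: rest : List Int) := fun x hx => by simp [hx]
      have hrestdeg : ∀ x ∈ rest, deg.getD x 0 = 0 := by
        intro x hx
        have hxq := hrestq x hx
        have hxN := inv.qSub x hxq
        have hxdp : x ∉ dp.keys := fun h => inv.disj x h hxq
        exact (inv.qIff x hxN hxdp).mp hxq
      have hextrest : ∀ p ∈ ext, p ∉ rest := fun p hp hr =>
        hextpos p hp (hrestdeg p hr)
      -- new dp keys
      have hkeys' : (dp.insert node ((g.getD node []).foldl
          (fun b x => PySem.Int.mod (b * (1 + dp.getD x 0)) 10000007) 1)).keys =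
          dp.keys ++ [node] := by
        apply PySem.Dict.keys_insert_of_not_contains
        have := (PySem.Dict.contains_iff_mem_keys dp node)
        cases hcon : dp.contains node
        · rfl
        · exact absurd (this.mp hcon) hnodedp
      -- count of a queue/processed element in the parents list is zero
      have hcount0 : ∀ x : Int, deg.getD x 0 = 0 → (rg.getD node []).count x = 0 := by
        intro x hx0
        have := hcnt x
        rw [hx0] at this
        omega
      -- establish the invariant for the next state
      set bns := (g.getD node []).foldl
          (fun b x => PySem.Int.mod (b * (1 + dp.getD x 0)) 10000007) 1 with hbnsdef
      set dp' := dp.insert node bns with hdp'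
      have hmem' : ∀ x, x ∈ dp'.keys ↔ x ∈ dp.keys ∨ x = node := by
        intro x; rw [hdp', hkeys']; simp
      have hgetD' : ∀ x, dp'.getD x 0 = if x = node then bns else dp.getD x 0 := by
        intro x; rw [hdp', PySem.Dict.getD_insert]
      have inv' : KInv edges
          ((rg.getD node []).foldl (fun (s : PySem.Dict Int Int × List Int) par =>
            (s.1.insert par (s.1.getD par 0 - 1),
             if s.1.getD par 0 - 1 = 0 then s.2 ++ [par] else s.2)) (deg, rest)).1
          (rest ++ ext) dp' := by
        constructor
        · -- dpNodup
          rw [hdp', hkeys']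
          refine List.nodup_append.mpr ⟨inv.dpNodup, by simp, ?_⟩
          intro a ha b hb
          have : b = node := by simpa using hb
          subst this
          exact fun h => hnodedp (h ▸ ha)
        · -- qNodup
          refine List.nodup_append.mpr ⟨inv.qNodup.of_cons, hextnd, ?_⟩
          intro a ha b hb h
          subst h
          exact hextrest a hb ha
        · -- disj
          intro x hx hq
          rw [hmem'] at hx
          rcases List.mem_append.mp hq with hr | he
          · rcases hx with hx | rfl
            · exact inv.disj x hx (hrestq x hr)
            · exact (List.nodup_cons.mp inv.qNodup).1 hr
          · rcases hx with hx | rfl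
            · exact hextdp x he hx
            · exact hextnode he
        · -- dpSub
          intro x hx
          rcases (hmem' x).mp hx with hx | hxeq
          · exact inv.dpSub x hx
          · subst hxeq; exact hnodeN
        · -- qSub
          intro x hx
          rcases List.mem_append.mp hx with hr | he
          · exact inv.qSub x (hrestq x hr)
          · have hxp := (hextdeg x he).2
            rw [hrg] at hxp
            exact mem_nodesE_of_parent hxp
        · -- dpVal
          intro x hx
          rw [hgetD' x]
          rcases (hmem' x).mp hx with hx' | hxeq
          · have hxne : x ≠ node := fun h => hnodedp (h ▸ hx')
            rw [if_neg hxne]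
            exact inv.dpVal x hx'
          · subst hxeq
            rw [if_pos rfl]
            exact hbns
        · -- dpClosed
          intro x hx c hc
          rw [hmem']
          rcases (hmem' x).mp hx with hx' | hxeq
          · exact Or.inl (inv.dpClosed x hx' c hc)
          · subst hxeq
            exact Or.inl (inv.qReady x hnodeq c hc)
        · -- qReady
          intro x hx c hc
          rw [hmem']
          rcases List.mem_append.mp hx with hr | he
          · exact Or.inl (inv.qReady x (hrestq x hr) c hc)
          · -- x ∈ ext: its unprocessed children are all node
            obtain ⟨hcnt0, _⟩ := hextdeg x he
            rw [inv.degVal x, hrg, count_parents] at hcnt0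
            by_cases hcdp : c ∈ dp.keys
            · exact Or.inl hcdp
            · refine Or.inr ?_
              refine filter_nil_of_length_eq_count (pvChildren edges x)
                (fun c => !(decide (c ∈ dp.keys))) node
                (by simpa using hnodedp) (by exact_mod_cast hcnt0) c hc (by simpa using hcdp)
        · -- degVal
          intro x
          rw [hdeg' x, inv.degVal x, hrg, count_parents]
          have hPnode : (fun c => !(decide (c ∈ dp.keys))) node = true := by simpa using hnodedp
          have hsplit := filter_length_split (pvChildren edges x)
            (fun c => !(decide (c ∈ dp.keys))) node hPnode
          have hfeq : (pvChildren edges x).filter (fun c => !(decide (c ∈ dp'.keys))) =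
              (pvChildren edges x).filter
                (fun c => (!(decide (c ∈ dp.keys))) && !(c == node)) := by
            apply List.filter_congr
            intro c _
            by_cases h1 : c ∈ dp.keys
            · have hcm : c ∈ dp'.keys := (hmem' c).mpr (Or.inl h1)
              simp [h1, hcm]
            · by_cases h2 : c = node
              · subst h2
                have hcm : c ∈ dp'.keys := (hmem' c).mpr (Or.inr rfl)
                simp [hcm]
              · have hcm : c ∉ dp'.keys := fun hmem => by
                  rcases (hmem' c).mp hmem with h | h
                  · exact h1 h
                  · exact h2 h
                simp [h1, h2, hcm]
          rw [hfeq]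
          simp only [] at hsplit
          omega
        · -- qIff
          intro x hxN hxdp'
          have hxdp : x ∉ dp.keys := fun h => hxdp' ((hmem' x).mpr (Or.inl h))
          have hxnode : x ≠ node := fun h => hxdp' ((hmem' x).mpr (Or.inr h))
          rw [hdeg' x]
          constructor
          · intro hx
            rcases List.mem_append.mp hx with hr | he
            · have h0 := hrestdeg x hr
              rw [h0, hcount0 x h0]
              rfl
            · obtain ⟨hcnt0, _⟩ := hextdeg x he
              omega
          · intro h0
            by_cases hc0 : (rg.getD node []).count x = 0
            · rw [hc0] at h0
              push_cast at h0
              have hdeg0 : deg.getD x 0 = 0 := by omega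
              have := (inv.qIff x hxN hxdp).mpr hdeg0
              rcases List.mem_cons.mp this with h | h
              · exact absurd h hxnode
              · exact List.mem_append.mpr (Or.inl h)
            · refine List.mem_append.mpr (Or.inr ((hextmem x).mpr ⟨?_, by omega⟩))
              exact List.count_pos_iff.mp (by omega)
      -- apply the induction hypothesis
      have hlen' : (pvNodesE edges).length ≤ fuel + dp'.keys.length := by
        rw [hdp', hkeys', List.length_append]
        simpa using (by omega : (pvNodesE edges).length ≤ fuel + (dp.keys.length + 1))
      have hgoal : pvKahnLoop g rg (fuel + 1) deg (node :: rest) dp =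
          pvKahnLoop g rg fuel
            ((rg.getD node []).foldl (fun (s : PySem.Dict Int Int × List Int) par =>
              (s.1.insert par (s.1.getD par 0 - 1),
               if s.1.getD par 0 - 1 = 0 then s.2 ++ [par] else s.2)) (deg, rest)).1
            ((rg.getD node []).foldl (fun (s : PySem.Dict Int Int × List Int) par =>
              (s.1.insert par (s.1.getD par 0 - 1),
               if s.1.getD par 0 - 1 = 0 then s.2 ++ [par] else s.2)) (deg, rest)).2
            dp' := rfl
      rw [hgoal, hq']
      exact ih _ _ _ inv' hlen'

theorem countB_correct (edges : List (Int × Int)) (N : Nat)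
    (childD : PySem.Dict Int (List Int))
    (hchild : ∀ n, childD.getD n [] = pvChildren edges n) :
    ∀ (k : Nat) (n : Int) (fuel : Nat) (memo : PySem.Dict Int Int),
      (pvStep edges)^[k] [n] = [] → k ≤ fuel → k ≤ N + 1 →
      (∀ x r, memo.get? x = some r → r = pvF edges (N + 1) x) →
      (pvCountB childD fuel memo n).1 = pvF edges (N + 1) n ∧
      (∀ x r, (pvCountB childD fuel memo n).2.get? x = some r → r = pvF edges (N + 1) x) := by
  intro k
  induction k with
  | zero => intro n fuel memo h; simp at h
  | succ k ih =>
    intro n fuel memo h hf hN hInv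
    obtain ⟨f, rfl⟩ : ∃ f, fuel = f + 1 := ⟨fuel - 1, by omega⟩
    cases hm : memo.get? n with
    | some r =>
      simp only [pvCountB, hm]
      exact ⟨hInv n r hm, hInv⟩
    | none =>
      have hfold :
          ∀ (cs : List Int), (∀ c ∈ cs, (pvStep edges)^[k] [c] = []) →
          ∀ (acc : Int) (m : PySem.Dict Int Int),
            (∀ x r, m.get? x = some r → r = pvF edges (N + 1) x) →
            (cs.foldl (fun (s : Int × PySem.Dict Int Int) c =>
                let rc := pvCountB childD f s.2 c
                (PySem.Int.mod (s.1 * (1 + rc.1)) 10000007, rc.2)) (acc, m)).1 =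
              cs.foldl (fun a c => PySem.Int.mod (a * (1 + pvF edges (N + 1) c)) 10000007) acc ∧
            (∀ x r, (cs.foldl (fun (s : Int × PySem.Dict Int Int) c =>
                let rc := pvCountB childD f s.2 c
                (PySem.Int.mod (s.1 * (1 + rc.1)) 10000007, rc.2)) (acc, m)).2.get? x = some r →
              r = pvF edges (N + 1) x) := by
        intro cs
        induction cs with
        | nil => intro _ acc m hm'; exact ⟨rfl, hm'⟩
        | cons c t iht =>
          intro hcs acc m hm'
          obtain ⟨hc1, hc2⟩ := ih c f m (hcs c (by simp)) (by omega) (by omega) hm'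
          show (List.foldl (fun (s : Int × PySem.Dict Int Int) c =>
                  let rc := pvCountB childD f s.2 c
                  (PySem.Int.mod (s.1 * (1 + rc.1)) 10000007, rc.2))
                (PySem.Int.mod (acc * (1 + (pvCountB childD f m c).1)) 10000007,
                  (pvCountB childD f m c).2) t).1 =
              List.foldl (fun a c => PySem.Int.mod (a * (1 + pvF edges (N + 1) c)) 10000007)
                (PySem.Int.mod (acc * (1 + pvF edges (N + 1) c)) 10000007) t ∧
            (∀ x r, (List.foldl (fun (s : Int × PySem.Dict Int Int) c =>
                  let rc := pvCountB childD f s.2 c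
                  (PySem.Int.mod (s.1 * (1 + rc.1)) 10000007, rc.2))
                (PySem.Int.mod (acc * (1 + (pvCountB childD f m c).1)) 10000007,
                  (pvCountB childD f m c).2) t).2.get? x = some r →
              r = pvF edges (N + 1) x)
          rw [hc1]
          exact iht (fun c hc => hcs c (by simp [hc])) _ _ hc2
      have hcs : ∀ c ∈ childD.getD n [], (pvStep edges)^[k] [c] = [] := by
        intro c hc
        rw [hchild] at hc
        exact pvIter_child_empty hc h
      obtain ⟨h1, h2⟩ := hfold (childD.getD n []) hcs 1 memo hInv
      simp only [pvCountB, hm]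
      constructor
      · show (_ : Int) = _
        rw [h1, hchild]
        have : pvF edges (N + 1) n =
            (pvChildren edges n).foldl
              (fun a c => PySem.Int.mod (a * (1 + pvF edges N c)) 10000007) 1 := rfl
        rw [this]
        apply PySem.List.foldl_congr_mem
        intro acc c hc
        rw [pvF_stable edges k c (N + 1) N (pvIter_child_empty hc h) (by omega) (by omega)]
      · intro x r hx
        show r = _
        rw [PySem.Dict.get?_insert] at hx
        split at hx
        · rename_i hxn
          subst hxn
          cases hx
          rw [h1, hchild]
          have : pvF edges (N + 1) x =
              (pvChildren edges x).foldl
                (fun a c => PySem.Int.mod (a * (1 + pvF edges N c)) 10000007) 1 := rfl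
          rw [this]
          apply PySem.List.foldl_congr_mem
          intro acc c hc
          rw [pvF_stable edges k c (N + 1) N (pvIter_child_empty hc h) (by omega) (by omega)]
        · exact h2 x r hx

-- the top-level accumulation loop of B
theorem topB_fold (edges : List (Int × Int)) (childD : PySem.Dict Int (List Int))
    (hchild : ∀ n, childD.getD n [] = pvChildren edges n) (hPre : PreE edges) :
    ∀ (ks : List Int), (∀ n ∈ ks, n ∈ pvNodesE edges) →
    ∀ (acc : Int) (memo : PySem.Dict Int Int),
      (∀ x r, memo.get? x = some r → r = pvF edges ((pvNodesE edges).length + 1) x) →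
      (ks.foldl (fun (s : Int × PySem.Dict Int Int) n =>
          let r := pvCountB childD ((pvNodesE edges).length + 1) s.2 n
          (s.1 + r.1, r.2)) (acc, memo)).1 =
        acc + (ks.map (pvF edges ((pvNodesE edges).length + 1))).sum := by
  intro ks
  induction ks with
  | nil => intro _ acc memo _; simp
  | cons n t ih =>
    intro hks acc memo hInv
    obtain ⟨h1, h2⟩ := countB_correct edges (pvNodesE edges).length childD hchild
      (pvNodesE edges).length n ((pvNodesE edges).length + 1) memo
      (hPre n (hks n (by simp))) (by omega) (by omega) hInv
    show (List.foldl (fun (s : Int × PySem.Dict Int Int) n =>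
        let r := pvCountB childD ((pvNodesE edges).length + 1) s.2 n
        (s.1 + r.1, r.2))
        (acc + (pvCountB childD ((pvNodesE edges).length + 1) memo n).1,
          (pvCountB childD ((pvNodesE edges).length + 1) memo n).2) t).1 =
      acc + ((n :: t).map (pvF edges ((pvNodesE edges).length + 1))).sum
    rw [h1, ih (fun c hc => hks c (by simp [hc])) _ _ h2, List.map_cons, List.sum_cons]
    ring

-- ===== VERDICT (by name: the statement is the Claim_ definition above) =====
theorem getSubtreeCount_spec : Claim_equal_getSubtreeCount := by
  intro start end_ _hDom hPre
  show getSubtreeCount start end_ = getSubtreeCount_alt start end_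
  have hPreE : PreE (start.zip end_) := hPre
  set edges := start.zip end_ with hedges
  set N := (pvNodesE edges).length with hN
  set Fs := pvF edges (N + 1) with hFs
  -- ===== the A side =====
  simp only [getSubtreeCount]
  rw [PySem.List.foldl_prod_mk
      (f := fun (d : PySem.Dict Int (List Int)) (e : Int × Int) => d.modify e.1 [] (· ++ [e.2]))
      (g := fun (s : PySem.Dict Int (List Int) × PySem.Dict Int Int) (e : Int × Int) =>
        (s.1.modify e.2 [] (· ++ [e.1]), (s.2.modify e.1 0 (· + 1)).setdefault e.2 0)),
    PySem.List.foldl_prod_mk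
      (f := fun (d : PySem.Dict Int (List Int)) (e : Int × Int) => d.modify e.2 [] (· ++ [e.1]))
      (g := fun (d : PySem.Dict Int Int) (e : Int × Int) => (d.modify e.1 0 (· + 1)).setdefault e.2 0)]
  set G := edges.foldl (fun (d : PySem.Dict Int (List Int)) e => d.modify e.1 [] (· ++ [e.2]))
    PySem.Dict.empty with hG
  set RG := edges.foldl (fun (d : PySem.Dict Int (List Int)) e => d.modify e.2 [] (· ++ [e.1]))
    PySem.Dict.empty with hRG
  set DEG := edges.foldl (fun (d : PySem.Dict Int Int) e => (d.modify e.1 0 (· + 1)).setdefault e.2 0)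
    PySem.Dict.empty with hDEG
  have hg : ∀ n, G.getD n [] = pvChildren edges n := by
    intro n
    rw [hG, PySem.Dict.getD_foldl_modify_append, PySem.Dict.getD_empty, List.nil_append]
    rfl
  have hrg : ∀ n, RG.getD n [] = pvParents edges n := by
    intro n
    rw [hRG, getD_rgraph_fold]
  have hdeg : ∀ n, DEG.getD n 0 = ((pvChildren edges n).length : Int) := by
    intro n
    rw [hDEG, getD_deg_fold, PySem.Dict.getD_empty, pvChildren, List.length_map]
    ring
  have hkeys : DEG.keys = pvNodesE edges := by
    rw [hDEG, keys_fold_generic _ keys_step_A, PySem.Dict.keys_empty, PySem.Set.update_nil_left]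
    rfl
  have hnodesnd : (pvNodesE edges).Nodup := PySem.Set.nodup_ofList _
  -- the initial invariant
  have inv0 : KInv edges DEG (DEG.keys.filter (fun k => DEG.getD k 0 == 0)) PySem.Dict.empty := by
    constructor
    · simp [PySem.Dict.keys_empty]
    · rw [hkeys]; exact hnodesnd.filter _
    · simp [PySem.Dict.keys_empty]
    · simp [PySem.Dict.keys_empty]
    · intro x hx
      rw [hkeys] at hx
      exact (List.mem_filter.mp hx).1
    · simp [PySem.Dict.keys_empty]
    · simp [PySem.Dict.keys_empty]
    · intro x hx c hc
      exfalso
      have h0 := (List.mem_filter.mp hx).2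
      rw [hdeg x] at h0
      have hlen0 : (pvChildren edges x).length = 0 := by
        have := beq_iff_eq.mp h0
        omega
      rw [List.length_eq_zero_iff.mp hlen0] at hc
      simp at hc
    · intro x
      rw [hdeg x, PySem.Dict.keys_empty]
      have : (pvChildren edges x).filter (fun c => !(decide (c ∈ ([] : List Int)))) =
          pvChildren edges x := by
        apply List.filter_eq_self.mpr
        intro c _
        simp
      rw [this]
    · intro x hx _
      rw [List.mem_filter, hkeys, hdeg x]
      constructor
      · intro ⟨_, hb⟩
        exact beq_iff_eq.mp hb
      · intro hb
        exact ⟨hx, beq_iff_eq.mpr hb⟩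
  have hlen0 : (pvNodesE edges).length ≤
      DEG.keys.length + (PySem.Dict.empty : PySem.Dict Int Int).keys.length := by
    rw [hkeys, PySem.Dict.keys_empty]
    simp
  obtain ⟨hnd, hmemiff, hval⟩ :=
    kahn_correct edges hPreE G RG hg hrg DEG.keys.length DEG
      (DEG.keys.filter (fun k => DEG.getD k 0 == 0)) PySem.Dict.empty inv0 hlen0
  set dpf := pvKahnLoop G RG DEG.keys.length DEG
      (DEG.keys.filter (fun k => DEG.getD k 0 == 0)) PySem.Dict.empty with hdpf
  have hperm : dpf.keys.Perm (pvNodesE edges) :=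
    (List.perm_ext_iff_of_nodup hnd hnodesnd).mpr hmemiff
  have hvalsum : (dpf.values.foldl (· + ·) 0) = ((pvNodesE edges).map Fs).sum := by
    rw [PySem.Dict.values_eq_map_keys dpf hnd 0, ← List.sum_eq_foldl]
    have hmapeq : dpf.keys.map (fun k => dpf.getD k 0) = dpf.keys.map Fs := by
      apply List.map_congr_left
      intro x hx
      exact hval x hx
    rw [hmapeq]
    exact (hperm.map Fs).sum_eq
  rw [hvalsum]
  -- ===== the B side =====
  simp only [getSubtreeCount_alt]
  set CD := edges.foldl (fun (d : PySem.Dict Int (List Int)) e =>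
    (d.insert e.1 (d.getD e.1 [] ++ [e.2])).setdefault e.2 []) PySem.Dict.empty with hCD
  have hchild : ∀ n, CD.getD n [] = pvChildren edges n := by
    intro n
    rw [hCD, getD_childD_fold, PySem.Dict.getD_empty, List.nil_append]
    rfl
  have hkeysB : CD.keys = pvNodesE edges := by
    rw [hCD, keys_fold_generic _ keys_step_B, PySem.Dict.keys_empty, PySem.Set.update_nil_left]
    rfl
  rw [hkeysB]
  rw [topB_fold edges CD hchild hPreE (pvNodesE edges) (fun n hn => hn) 0 PySem.Dict.empty
    (by intro x r hx; rw [PySem.Dict.get?_empty] at hx; cases hx)]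
  rw [zero_add]
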